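-- pv_equiv track=rewrite | github.com/patarzynak/Sarcagator | sarcagator.py | find_merit_attack
-- ===== SOURCE A (Python) =====
-- def find_merit_attack(tags):
-- 	attack = None
-- 	s_found = False
-- 	for t in tags:
-- 		word = t[0].lower()
-- 		#if t[1] == 'VBZ':
-- 		if word == '\'s' or word == 'is':
-- 			s_found = True
-- 			pass
-- 		if s_found == True:
-- 			if t[1] == '.':
-- 				break
-- 			if t[1] == 'VBN' or t[1] == 'VBG' or t[1] == 'JJ':
-- 				attack = t[0]
-- 				break
--
-- 	return attack
-- ===== SOURCE B (Python) =====
-- def find_merit_attack(tags):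
--     # Back-to-front dynamic programming: for each suffix, compute simultaneously
--     # the answer assuming the trigger flag is already ON and assuming it is OFF.
--     on = None   # answer for this suffix if "'s"/"is" was already seen
--     off = None  # answer for this suffix if not yet seen
--     for t in reversed(tags):
--         if t[1] == '.':
--             new_on = None
--         elif t[1] in ('VBN', 'VBG', 'JJ'):
--             new_on = t[0]
--         else:
--             new_on = on
--         on = new_on
--         if t[0].lower() in ("'s", "is"):
--             off = new_on
--     return off
-- ===== Notes on version B (the rewrite author's own statement) =====
-- stated objective: alternative
-- what changed: Replaces A's forward single pass with a mutable trigger flag by a back-to-front dynamic program (a right fold) that computes, for each suffix, the answer under both flag states simultaneously and reads off the flag-off component.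
import Mathlib
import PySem

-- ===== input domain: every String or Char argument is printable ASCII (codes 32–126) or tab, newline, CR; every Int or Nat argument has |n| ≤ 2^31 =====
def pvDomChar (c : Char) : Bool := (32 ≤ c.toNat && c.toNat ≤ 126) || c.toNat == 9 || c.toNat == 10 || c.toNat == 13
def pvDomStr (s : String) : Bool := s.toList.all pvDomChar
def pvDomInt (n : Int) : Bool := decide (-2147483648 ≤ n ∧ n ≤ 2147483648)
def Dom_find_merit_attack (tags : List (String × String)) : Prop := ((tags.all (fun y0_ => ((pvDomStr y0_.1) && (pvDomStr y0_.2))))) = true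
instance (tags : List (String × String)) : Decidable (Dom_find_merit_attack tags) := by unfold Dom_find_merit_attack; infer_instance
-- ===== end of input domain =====

-- B replaces A's forward flag-carrying loop by a back-to-front fold that computes, for
-- every suffix, the answer for both flag states at once (alternative decomposition, same cost).

-- ===== PORT A =====
-- A's loop with the s_found flag as state; `break` is an early return (attack is only
-- assigned immediately before a break, so the accumulator is always none at a break).
def findMeritLoop : List (String × String) → Bool → Option String
  | [], _ => none
  | t :: rest, s_found =>
    let word := PySem.Str.lower t.1
    let s := if word == "'s" || word == "is" then true else s_found
    if s then
      if t.2 == "." then none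
      else if t.2 == "VBN" || t.2 == "VBG" || t.2 == "JJ" then some t.1
      else findMeritLoop rest s
    else findMeritLoop rest s

def find_merit_attack (tags : List (String × String)) : Option String :=
  findMeritLoop tags false

-- ===== PORT B =====
-- Source B's reversed-order loop as a foldr: state = (answer if flag already on, answer if flag off)
def meritStep (t : String × String) (p : Option String × Option String) :
    Option String × Option String :=
  let newOn : Option String :=
    if t.2 == "." then none
    else if t.2 == "VBN" || t.2 == "VBG" || t.2 == "JJ" then some t.1
    else p.1
  (newOn, if PySem.Str.lower t.1 == "'s" || PySem.Str.lower t.1 == "is" then newOn else p.2)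

def find_merit_attack_alt (tags : List (String × String)) : Option String :=
  (tags.foldr meritStep (none, none)).2

-- ===== PRECONDITION & SPEC =====
def Spec_find_merit_attack (tags : List (String × String)) (out : Option String) : Prop := out = find_merit_attack_alt tags
instance (tags : List (String × String)) (out : Option String) : Decidable (Spec_find_merit_attack tags out) := by unfold Spec_find_merit_attack; infer_instance

-- ===== CLAIM (what is proved, stated in full; the proofs are below) =====
def Claim_equal_find_merit_attack : Prop := ∀ (tags : List (String × String)), Dom_find_merit_attack tags → Spec_find_merit_attack tags (find_merit_attack tags)

-- ===== LEMMAS AND PROOFS =====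

-- A's loop from flag state b computes the corresponding component of B's suffix fold.
theorem findMeritLoop_eq_fold (tags : List (String × String)) (b : Bool) :
    findMeritLoop tags b =
      (if b then (tags.foldr meritStep (none, none)).1
       else (tags.foldr meritStep (none, none)).2) := by
  induction tags generalizing b with
  | nil => cases b <;> rfl
  | cons t rest ih =>
    simp only [List.foldr_cons, findMeritLoop, meritStep]
    by_cases htr : (PySem.Str.lower t.1 == "'s" || PySem.Str.lower t.1 == "is") = true
    · simp only [htr, if_true]
      by_cases hdot : (t.2 == ".") = true
      · simp [hdot]
      · by_cases hatk : (t.2 == "VBN" || t.2 == "VBG" || t.2 == "JJ") = true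
        · simp [hdot, hatk]
        · simp only [hdot, hatk, Bool.false_eq_true, if_false, ih]
          cases b <;> simp
    · simp only [Bool.not_eq_true] at htr
      simp only [htr, Bool.false_eq_true, if_false]
      cases b with
      | true =>
        by_cases hdot : (t.2 == ".") = true
        · simp [hdot]
        · by_cases hatk : (t.2 == "VBN" || t.2 == "VBG" || t.2 == "JJ") = true
          · simp [hdot, hatk]
          · simp [hdot, hatk, ih]
      | false => simp [ih]

-- ===== VERDICT (by name: the statement is the Claim_ definition above) =====
theorem find_merit_attack_spec : Claim_equal_find_merit_attack := by
  intro tags _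
  unfold Spec_find_merit_attack find_merit_attack find_merit_attack_alt
  simpa using findMeritLoop_eq_fold tags false
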